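-- pv_equiv track=rewrite | github.com/FonziePants/adventofcode | 2023/day12/day12.py | possible_patterns
-- ===== SOURCE A (Python) =====
-- def possible_patterns(broken, unknown):
--     options = []
--     min_bin = (2**broken)-1
--     max_bin = (2**unknown)
--     for num in range(min_bin, max_bin):
--         pattern = bin(num)[2:]
--         pattern = '0'*(unknown-len(pattern)) + pattern
--         if pattern.count('1') == broken:
--             pattern = '0'*(unknown-len(pattern)) + pattern
--             options.append(pattern.replace('1','#').replace('0','.'))
--     return options
-- ===== SOURCE B (Python) =====
-- def possible_patterns(broken, unknown):
--     # Generate the C(unknown, broken) valid patterns directly with an explicit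
--     # DFS stack ('.' branch explored before '#', reproducing A's output order)
--     # instead of scanning all 2**unknown binary numbers and filtering.
--     out = []
--     stack = [('', broken, unknown)]
--     while stack:
--         prefix, k, n = stack.pop()
--         if k < 0 or k > n:
--             continue
--         if n == 0:
--             out.append(prefix)
--             continue
--         stack.append((prefix + '#', k - 1, n - 1))
--         stack.append((prefix + '.', k, n - 1))
--     return out
-- ===== Notes on version B (the rewrite author's own statement) =====
-- stated objective: faster
-- what changed: B generates the C(unknown,broken) valid patterns directly with an explicit DFS stack over (prefix, remaining '#', remaining length), '.' branch before '#' (reproducing A's numeric order), instead of scanning all 2**unknown binary numbers and filtering by popcount.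
-- intended difference: On broken=0, unknown=0 A pads bin(0)='0' into a length-1 pattern and returns ['.'] although patterns must have length 0; B returns [''], the unique empty pattern with zero '#', which is the intended value. — e.g. on possible_patterns(0, 0): A returns ["."], B returns [""]
import Mathlib
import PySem

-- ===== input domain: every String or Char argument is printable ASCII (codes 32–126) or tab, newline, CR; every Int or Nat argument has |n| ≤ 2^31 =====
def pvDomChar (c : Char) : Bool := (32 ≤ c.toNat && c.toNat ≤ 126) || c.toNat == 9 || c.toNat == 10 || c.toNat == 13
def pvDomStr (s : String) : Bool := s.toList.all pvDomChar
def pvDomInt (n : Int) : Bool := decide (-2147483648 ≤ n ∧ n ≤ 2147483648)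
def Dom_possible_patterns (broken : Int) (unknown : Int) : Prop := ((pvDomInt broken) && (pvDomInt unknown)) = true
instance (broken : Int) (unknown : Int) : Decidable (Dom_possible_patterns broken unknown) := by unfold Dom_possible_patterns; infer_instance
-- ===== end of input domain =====

-- B replaces A's scan-all-2^unknown-binary-numbers-and-filter loop by a direct recursive
-- generation of exactly the C(unknown,broken) patterns, in the same output order.

-- ===== PORT A =====
-- bin(n)[2:] for n ≥ 1 (big-endian binary digits, no leading zeros); exact on Nat
def pvBin : Nat → List Char
  | 0 => []
  | (n+1) => pvBin ((n+1)/2) ++ [if (n+1) % 2 = 1 then '1' else '0']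
decreasing_by exact Nat.div_lt_self (Nat.succ_pos n) (by omega)

-- bin(n)[2:] for n ≥ 0 (bin(0)[2:] = "0")
def pvBinStr (n : Nat) : List Char := if n = 0 then ['0'] else pvBin n

def possible_patterns (broken : Int) (unknown : Int) : List String :=
  let min_bin : Int := 2 ^ broken.toNat - 1      -- 2**broken; exact for broken ≥ 0 (Pre_)
  let max_bin : Int := 2 ^ unknown.toNat         -- 2**unknown; exact for unknown ≥ 0 (Pre_)
  (PySem.List.pyRange min_bin max_bin 1).foldl (fun options num =>
    let pattern := pvBinStr num.toNat            -- num ≥ 0 for every num the loop visits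
    let pattern := List.replicate (unknown - (pattern.length : Int)).toNat '0' ++ pattern
    if (pattern.count '1' : Int) = broken then
      let pattern := List.replicate (unknown - (pattern.length : Int)).toNat '0' ++ pattern
      options ++ [String.mk ((pattern.map (fun c => if c = '1' then '#' else c)).map
                              (fun c => if c = '0' then '.' else c))]
    else options) []

-- ===== PORT B =====
-- each stack entry contributes 3^(n+1) to the measure; the loop strictly decreases it,
-- so fuel = pvMeasure of the initial stack makes the while-loop total
def pvMeasure (st : List (List Char × Int × Int)) : Nat :=
  (st.map (fun t => 3 ^ (t.2.2.toNat + 1))).sum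

-- the while-loop of Source B (stack top = list head; Source B pushes '#' then '.', so '.' is popped first)
def pvLoop : Nat → List (List Char × Int × Int) → List String → List String
  | _, [], out => out
  | 0, _ :: _, out => out
  | (f+1), (p, k, n) :: rest, out =>
    if k < 0 ∨ n < k then pvLoop f rest out
    else if n = 0 then pvLoop f rest (out ++ [String.mk p])
    else pvLoop f ((p ++ ['.'], k, n - 1) :: (p ++ ['#'], k - 1, n - 1) :: rest) out

def possible_patterns_alt (broken : Int) (unknown : Int) : List String :=
  pvLoop (pvMeasure [([], broken, unknown)]) [([], broken, unknown)] []

-- ===== PRECONDITION & SPEC =====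
-- A raises TypeError when broken < 0 or unknown < 0 (2**negative is a float, range rejects it)
def Pre_possible_patterns (broken : Int) (unknown : Int) : Prop := 0 ≤ broken ∧ 0 ≤ unknown
instance (broken : Int) (unknown : Int) : Decidable (Pre_possible_patterns broken unknown) := by
  unfold Pre_possible_patterns; infer_instance
def pvWitness_possible_patterns : Int × Int := (2, 4)

-- On broken=0, unknown=0 A pads bin(0)='0' into a length-1 pattern and returns ["."] although
-- patterns must have length 0; B returns [""], the unique empty pattern with zero '#', the intended value.
def D_possible_patterns (broken : Int) (unknown : Int) : Prop := broken = 0 ∧ unknown = 0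
instance (broken : Int) (unknown : Int) : Decidable (D_possible_patterns broken unknown) := by
  unfold D_possible_patterns; infer_instance

def Spec_possible_patterns (broken : Int) (unknown : Int) (out : List String) : Prop :=
  ¬ D_possible_patterns broken unknown → out = possible_patterns_alt broken unknown
instance (broken : Int) (unknown : Int) (out : List String) : Decidable (Spec_possible_patterns broken unknown out) := by
  unfold Spec_possible_patterns; infer_instance

def pvDiffWitness_possible_patterns : Int × Int := (0, 0)
def pvDiffWitnessOut_possible_patterns : (List String) × (List String) := (["."], [""])

-- ===== CLAIM (what is proved, stated in full; the proofs are below) =====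
def Claim_unchanged_possible_patterns : Prop := ∀ (broken : Int) (unknown : Int), Dom_possible_patterns broken unknown → Pre_possible_patterns broken unknown → Spec_possible_patterns broken unknown (possible_patterns broken unknown)
def Claim_changed_possible_patterns : Prop := Dom_possible_patterns (pvDiffWitness_possible_patterns.1) (pvDiffWitness_possible_patterns.2) ∧ Pre_possible_patterns (pvDiffWitness_possible_patterns.1) (pvDiffWitness_possible_patterns.2) ∧ D_possible_patterns (pvDiffWitness_possible_patterns.1) (pvDiffWitness_possible_patterns.2) ∧ possible_patterns (pvDiffWitness_possible_patterns.1) (pvDiffWitness_possible_patterns.2) = pvDiffWitnessOut_possible_patterns.1 ∧ possible_patterns_alt (pvDiffWitness_possible_patterns.1) (pvDiffWitness_possible_patterns.2) = pvDiffWitnessOut_possible_patterns.2 ∧ pvDiffWitnessOut_possible_patterns.1 ≠ pvDiffWitnessOut_possible_patterns.2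
def Claim_exact_possible_patterns : Prop := ∀ (broken : Int) (unknown : Int), Dom_possible_patterns broken unknown → Pre_possible_patterns broken unknown → D_possible_patterns broken unknown → possible_patterns broken unknown ≠ possible_patterns_alt broken unknown

-- ===== LEMMAS AND PROOFS =====

-- recursive specification of the DFS loop: the patterns of length n with k '#',
-- '.'-branch first (fuel-totalised; fuel n+1 suffices)
def pvGen : Nat → Int → Int → List (List Char)
  | 0, _, _ => []
  | (f+1), k, n =>
    if k < 0 ∨ n < k then []
    else if n = 0 then [[]]
    else (pvGen f k (n-1)).map (fun s => '.' :: s) ++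
         (pvGen f (k-1) (n-1)).map (fun s => '#' :: s)

theorem pvMeasure_cons (p : List Char) (k n : Int) (rest : List (List Char × Int × Int)) :
    pvMeasure ((p, k, n) :: rest) = 3 ^ (n.toNat + 1) + pvMeasure rest := by
  simp [pvMeasure]

theorem pvLoop_spec : ∀ (f : Nat) (st : List (List Char × Int × Int)) (out : List String),
    pvMeasure st ≤ f →
    pvLoop f st out
      = out ++ st.flatMap
          (fun t => ((pvGen (t.2.2.toNat + 1) t.2.1 t.2.2).map (fun s => t.1 ++ s)).map String.mk) := by
  intro f
  induction f with
  | zero =>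
    intro st out h
    match st with
    | [] => simp [pvLoop]
    | (p, k, n) :: rest =>
      exfalso
      rw [pvMeasure_cons] at h
      have : 0 < 3 ^ (n.toNat + 1) := by positivity
      omega
  | succ f ih =>
    intro st out h
    match st with
    | [] => simp [pvLoop]
    | (p, k, n) :: rest =>
      rw [pvMeasure_cons] at h
      have h3 : 0 < 3 ^ (n.toNat + 1) := by positivity
      rw [pvLoop]
      by_cases hg : k < 0 ∨ n < k
      · rw [if_pos hg, ih rest out (by omega)]
        have hnil : pvGen (n.toNat + 1) k n = [] := by rw [pvGen, if_pos hg]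
        simp [hnil]
      · rw [if_neg hg]
        by_cases hn : n = 0
        · subst hn
          rw [if_pos rfl, ih rest _ (by omega)]
          have hone : pvGen 1 k 0 = [[]] := by
            show pvGen (0+1) k 0 = [[]]
            rw [pvGen, if_neg hg]
            simp
          simp [hone]
        · rw [if_neg hn]
          have hn1 : 1 ≤ n := by
            rcases not_or.mp hg with ⟨h1, h2⟩
            omega
          have hnt : n.toNat = (n - 1).toNat + 1 := by omega
          have hpow : 3 ^ (n.toNat + 1) = 3 * 3 ^ ((n - 1).toNat + 1) := by
            rw [hnt]
            ring
          have hfuel : pvMeasure ((p ++ ['.'], k, n - 1) :: (p ++ ['#'], k - 1, n - 1) :: rest) ≤ f := by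
            rw [pvMeasure_cons, pvMeasure_cons]
            have : 0 < 3 ^ ((n - 1).toNat + 1) := by positivity
            omega
          rw [ih _ out hfuel]
          have hsp : pvGen (n.toNat + 1) k n
              = (pvGen ((n - 1).toNat + 1) k (n - 1)).map (fun s => '.' :: s)
                ++ (pvGen ((n - 1).toNat + 1) (k - 1) (n - 1)).map (fun s => '#' :: s) := by
            rw [pvGen, if_neg hg, if_neg hn, hnt]
          simp [hsp, List.map_map, List.map_append, Function.comp_def, List.append_assoc]

-- low-bit-last fixed-width binary rendering of n with u digits ('0'/'1')
def pvBL : Nat → Nat → List Char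
  | 0, _ => []
  | (u+1), n => pvBL u (n / 2) ++ [if n % 2 = 1 then '1' else '0']

-- the Nat-level mirror of pvGen, on raw '0'/'1' symbols
def pvG : Nat → Nat → List (List Char)
  | b, 0 => if b = 0 then [[]] else []
  | b, (u+1) => (pvG b u).map (fun s => '0' :: s) ++
                (if b = 0 then [] else (pvG (b-1) u).map (fun s => '1' :: s))

def pvSym (c : Char) : Char :=
  if (if c = '1' then '#' else c) = '0' then '.' else (if c = '1' then '#' else c)

theorem pvBin_count_ge {n b : Nat} (h : (pvBin n).count '1' = b) : 2 ^ b - 1 ≤ n := by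
  induction n using Nat.strong_induction_on generalizing b with
  | _ n ih =>
    match n with
    | 0 =>
      simp [pvBin] at h; subst h; simp
    | (m+1) =>
      rw [pvBin, List.count_append] at h
      have ih2 := ih ((m+1)/2) (by omega) rfl
      have hpos : 1 ≤ 2 ^ ((pvBin ((m+1)/2)).count '1') := Nat.one_le_two_pow
      by_cases hm : (m+1) % 2 = 1
      · rw [if_pos hm] at h
        simp at h
        have hb : b = (pvBin ((m+1)/2)).count '1' + 1 := by omega
        subst hb
        rw [pow_succ]
        omega
      · rw [if_neg hm] at h
        simp at h
        subst h
        omega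

theorem pvBL_count {u n : Nat} (h : n < 2 ^ u) :
    (pvBL u n).count '1' = (pvBin n).count '1' := by
  induction u generalizing n with
  | zero =>
    simp at h; subst h; simp [pvBL, pvBin]
  | succ u ih =>
    rw [pvBL, List.count_append]
    match n with
    | 0 =>
      simp [ih (Nat.two_pow_pos u), pvBin]
    | (m+1) =>
      rw [pvBin, List.count_append]
      have : (m+1)/2 < 2 ^ u := by
        have : 2 ^ (u+1) = 2 * 2 ^ u := by rw [← pow_succ']
        omega
      rw [ih this]

theorem pvBL_length (u n : Nat) : (pvBL u n).length = u := by
  induction u generalizing n with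
  | zero => rfl
  | succ u ih => rw [pvBL]; simp [ih]

theorem pvBL_zero (u : Nat) : pvBL u 0 = List.replicate u '0' := by
  induction u with
  | zero => rfl
  | succ u ih => rw [pvBL, ih]; simp [List.replicate_succ']

theorem pvBin_pos {n : Nat} (h : 1 ≤ n) :
    pvBin n = pvBin (n / 2) ++ [if n % 2 = 1 then '1' else '0'] := by
  match n, h with
  | (m+1), _ => rw [pvBin]

theorem pvPadBin_eq_pvBL : ∀ (u n : Nat), 1 ≤ n → n < 2 ^ u →
    List.replicate (u - (pvBin n).length) '0' ++ pvBin n = pvBL u n := by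
  intro u
  induction u with
  | zero => intro n h1 h2; simp at h2; omega
  | succ u ih =>
    intro n h1 h2
    have hp : 2 ^ (u+1) = 2 * 2 ^ u := by rw [← pow_succ']
    rw [pvBL, pvBin_pos h1]
    by_cases hn2 : n / 2 = 0
    · have hn1 : n = 1 := by omega
      subst hn1
      simp [pvBL_zero, pvBin]
    · have ih2 := ih (n / 2) (by omega) (by omega)
      rw [← ih2]
      simp only [List.length_append, List.length_cons, List.length_nil]
      rw [List.append_assoc]
      congr 2
      omega

-- the padded pattern A builds equals the fixed-width rendering (u ≥ 1)
theorem pvPad_eq_pvBL {u n : Nat} (hu : 1 ≤ u) (h : n < 2 ^ u) :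
    List.replicate (u - (pvBinStr n).length) '0' ++ pvBinStr n = pvBL u n := by
  rcases Nat.eq_zero_or_pos n with h0 | h1
  · subst h0
    rw [pvBL_zero]
    simp only [pvBinStr, if_pos rfl]
    have : u = (u - 1) + 1 := by omega
    rw [this, List.replicate_succ']
    simp
  · rw [pvBinStr, if_neg (by omega)]
    exact pvPadBin_eq_pvBL u n h1 h

-- high-bit peel of pvBL
theorem pvBL_hi : ∀ {u n : Nat}, n < 2 * 2 ^ u →
    pvBL (u+1) n = (if 2 ^ u ≤ n then '1' else '0') :: pvBL u (n % 2 ^ u) := by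
  intro u
  induction u with
  | zero =>
    intro n hn
    have : n < 2 := by simpa using hn
    interval_cases n <;> decide
  | succ u ih =>
    intro n hn
    have hp : 2 ^ (u+1) = 2 * 2 ^ u := by rw [← pow_succ']
    have e1 : (2 ^ u ≤ n / 2) = (2 ^ (u+1) ≤ n) := by
      rw [eq_iff_iff]; constructor <;> omega
    have e2 : n / 2 % 2 ^ u = n % 2 ^ (u+1) / 2 := by
      rw [hp, Nat.mod_mul_right_div_self]
    have e3 : n % 2 ^ (u+1) % 2 = n % 2 :=
      Nat.mod_mod_of_dvd n (dvd_pow_self 2 (Nat.succ_ne_zero u))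
    rw [pvBL, ih (by omega)]
    conv_rhs => rw [pvBL]
    simp only [e1, e2, e3, List.cons_append]

theorem pvG_gt {b u : Nat} (h : u < b) : pvG b u = [] := by
  induction u generalizing b with
  | zero => rw [pvG]; rw [if_neg (by omega)]
  | succ u ih =>
    rw [pvG, ih (by omega), if_neg (by omega), ih (by omega)]
    simp

-- the main correspondence: filtered binary scan = direct generation
theorem pvR_eq_pvG : ∀ (u b : Nat),
    ((List.range (2 ^ u)).filter (fun n => (pvBL u n).count '1' = b)).map (pvBL u) = pvG b u := by
  intro u
  induction u with
  | zero =>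
    intro b
    rw [pow_zero, List.range_one]
    by_cases hb : b = 0
    · simp [pvG, pvBL, hb]
    · simp [pvG, pvBL, hb]
      omega
  | succ u ih =>
    intro b
    have hsplit : List.range (2 ^ (u+1)) = List.range (2 ^ u) ++ (List.range (2 ^ u)).map (fun m => 2 ^ u + m) := by
      rw [pow_succ, mul_two, List.range_add]
    rw [hsplit, List.filter_append, List.map_append]
    have hmem1 : ∀ n ∈ List.range (2 ^ u), pvBL (u+1) n = '0' :: pvBL u n := by
      intro n hn
      have hn' : n < 2 ^ u := List.mem_range.mp hn
      rw [pvBL_hi (by omega), if_neg (by omega), Nat.mod_eq_of_lt hn']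
    have hfil1 : (List.range (2 ^ u)).filter (fun n => decide ((pvBL (u+1) n).count '1' = b))
        = (List.range (2 ^ u)).filter (fun n => decide ((pvBL u n).count '1' = b)) := by
      apply List.filter_congr
      intro n hn
      rw [hmem1 n hn]
      simp
    have hpart1 : ((List.range (2 ^ u)).filter (fun n => decide ((pvBL (u+1) n).count '1' = b))).map (pvBL (u+1))
        = (pvG b u).map (fun s => '0' :: s) := by
      rw [hfil1, ← ih b, List.map_map]
      apply List.map_congr_left
      intro n hn
      exact hmem1 n (List.mem_filter.mp hn).1
    have hmem2 : ∀ m, m < 2 ^ u → pvBL (u+1) (2 ^ u + m) = '1' :: pvBL u m := by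
      intro m hm
      rw [pvBL_hi (by omega), if_pos (by omega), Nat.add_mod_left, Nat.mod_eq_of_lt hm]
    have hfm : ((List.range (2 ^ u)).map (fun m => 2 ^ u + m)).filter (fun n => decide ((pvBL (u+1) n).count '1' = b))
        = ((List.range (2 ^ u)).filter (fun m => decide ((pvBL u m).count '1' + 1 = b))).map (fun m => 2 ^ u + m) := by
      rw [List.filter_map]
      congr 1
      apply List.filter_congr
      intro m hm
      have hm' : m < 2 ^ u := List.mem_range.mp hm
      simp only [Function.comp_apply]
      rw [hmem2 m hm']
      simp
    rw [hpart1, hfm, List.map_map]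
    cases b with
    | zero =>
      have hnil : (List.range (2 ^ u)).filter (fun m => decide ((pvBL u m).count '1' + 1 = 0)) = [] := by
        apply List.filter_eq_nil_iff.mpr
        intro a _
        simp
      rw [hnil]
      simp [pvG]
    | succ b' =>
      have hfil2 : (List.range (2 ^ u)).filter (fun m => decide ((pvBL u m).count '1' + 1 = b' + 1))
          = (List.range (2 ^ u)).filter (fun m => decide ((pvBL u m).count '1' = b')) := by
        apply List.filter_congr
        intro m _
        simp
      have hpart2 : ((List.range (2 ^ u)).filter (fun m => decide ((pvBL u m).count '1' = b'))).map (pvBL (u+1) ∘ fun m => 2 ^ u + m)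
          = (pvG b' u).map (fun s => '1' :: s) := by
        rw [← ih b', List.map_map]
        apply List.map_congr_left
        intro m hm
        have hm' : m < 2 ^ u := List.mem_range.mp (List.mem_filter.mp hm).1
        simp only [Function.comp_apply]
        exact hmem2 m hm'
      rw [hfil2, hpart2]
      simp [pvG]

-- pvGen = mapped pvG (enough fuel, Nat arguments)
theorem pvGen_eq_pvG : ∀ (u f b : Nat), u < f →
    pvGen f (b : Int) (u : Int) = (pvG b u).map (List.map pvSym) := by
  intro u
  induction u with
  | zero =>
    intro f b hf
    match f, hf with
    | (f'+1), _ =>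
      rw [pvGen]
      by_cases hb : b = 0
      · subst hb
        norm_num
        simp [pvG]
      · rw [if_pos (Or.inr (by exact_mod_cast Nat.pos_of_ne_zero hb)), pvG_gt (Nat.pos_of_ne_zero hb)]
        rfl
  | succ u ih =>
    intro f b hf
    match f, hf with
    | (f'+1), _ =>
      rw [pvGen]
      by_cases hub : u + 1 < b
      · rw [if_pos (Or.inr (by exact_mod_cast hub)), pvG_gt hub]
        rfl
      · rw [if_neg (by push_neg; exact ⟨Int.natCast_nonneg b, by exact_mod_cast Nat.le_of_not_lt hub⟩)]
        rw [if_neg (by exact_mod_cast Nat.succ_ne_zero u)]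
        have harg : ((u + 1 : Nat) : Int) - 1 = (u : Int) := by push_cast; ring
        rw [harg]
        cases b with
        | zero =>
          have hf1 : 1 ≤ f' := by omega
          match f', hf1 with
          | (f''+1), _ =>
            rw [ih (f''+1) 0 (by omega)]
            rw [show ((0 : Nat) : Int) - 1 = (-1 : Int) by norm_num]
            rw [pvGen, if_pos (Or.inl (by norm_num))]
            simp [pvG, List.map_map]
            intro a _
            decide
        | succ b' =>
          have hb1 : ((b' + 1 : Nat) : Int) - 1 = (b' : Int) := by push_cast; ring
          rw [hb1, ih f' (b'+1) (by omega), ih f' b' (by omega)]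
          simp [pvG, List.map_map, List.map_append]
          constructor

theorem pvMapfilter_congr {α β : Type} (l : List α) (p p' : α → Bool) (f f' : α → β)
    (hp : ∀ x ∈ l, p x = p' x) (hf : ∀ x ∈ l, f x = f' x) :
    (l.filter p).map f = (l.filter p').map f' := by
  rw [List.filter_congr hp]
  apply List.map_congr_left
  intro x hx
  exact hf x (List.mem_filter.mp hx).1

theorem pvRangeShift (b u : Nat) (hbu : b ≤ u) (q : Nat → Bool)
    (hq : ∀ n, n < 2 ^ b - 1 → q n = false) :
    (List.range (2 ^ u)).filter q
      = ((List.range (2 ^ u - (2 ^ b - 1))).filter (fun k => q (2 ^ b - 1 + k))).map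
          (fun k => 2 ^ b - 1 + k) := by
  have h1 : 2 ^ b ≤ 2 ^ u := Nat.pow_le_pow_right (by norm_num) hbu
  have hsp : (2:Nat) ^ u = (2 ^ b - 1) + (2 ^ u - (2 ^ b - 1)) :=
    (Nat.add_sub_cancel' (le_trans (Nat.sub_le _ _) h1)).symm
  conv_lhs => rw [hsp]
  rw [List.range_add, List.filter_append]
  have hnil : (List.range (2 ^ b - 1)).filter q = [] := by
    apply List.filter_eq_nil_iff.mpr
    intro a ha hqa
    rw [hq a (List.mem_range.mp ha)] at hqa
    simp at hqa
  rw [hnil, List.nil_append, List.filter_map]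
  rfl

-- ===== VERDICT (by name: the statement is the Claim_ definition above) =====
theorem possible_patterns_spec : Claim_unchanged_possible_patterns := by
  intro broken unknown _ hpre hD
  obtain ⟨hb0, hu0⟩ := hpre
  lift broken to ℕ using hb0 with b
  lift unknown to ℕ using hu0 with u
  have hDn : ¬ (b = 0 ∧ u = 0) := by
    rintro ⟨h1, h2⟩
    subst h1; subst h2
    exact hD ⟨rfl, rfl⟩
  show possible_patterns ↑b ↑u = possible_patterns_alt ↑b ↑u
  have hRHS : possible_patterns_alt ↑b ↑u = ((pvG b u).map (List.map pvSym)).map String.mk := by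
    unfold possible_patterns_alt
    rw [pvLoop_spec _ _ _ (le_refl _)]
    simp only [List.flatMap_cons, List.flatMap_nil, List.append_nil, List.nil_append,
      Int.toNat_natCast]
    rw [pvGen_eq_pvG u (u+1) b (Nat.lt_succ_self u)]
    simp [List.map_map]
  rw [hRHS]
  simp only [possible_patterns, Int.toNat_natCast]
  rw [PySem.List.foldl_append_ite, List.nil_append]
  by_cases hbu : b ≤ u
  · -- b ≤ u : prune the skipped prefix [0, 2^b-1) and transport to Nat
    have hu1 : 1 ≤ u := by
      rcases Nat.eq_zero_or_pos u with h0 | h1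
      · exfalso; apply hDn; omega
      · exact h1
    have h2bu : 2 ^ b ≤ 2 ^ u := Nat.pow_le_pow_right (by norm_num) hbu
    have hone : 1 ≤ 2 ^ b := Nat.one_le_two_pow
    have hc1 : ((2:Int) ^ b - 1) = ((2 ^ b - 1 : Nat) : Int) := by
      push_cast [hone]; ring
    have hc2 : ((2:Int) ^ u) = ((2 ^ u : Nat) : Int) := by push_cast; ring
    rw [hc1, hc2, PySem.List.pyRange_one, Int.toNat_sub]
    have hg : (fun k : Nat => ((2 ^ b - 1 : Nat) : Int) + (k : Int))
        = (fun k : Nat => ((2 ^ b - 1 + k : Nat) : Int)) := by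
      funext k; push_cast; ring
    rw [hg, List.filter_map, List.map_map]
    have hmemlt : ∀ k ∈ List.range (2 ^ u - (2 ^ b - 1)), 2 ^ b - 1 + k < 2 ^ u := by
      intro k hk
      have := List.mem_range.mp hk
      omega
    rw [pvMapfilter_congr (List.range (2 ^ u - (2 ^ b - 1))) _
          (fun k => decide ((pvBL u (2 ^ b - 1 + k)).count '1' = b)) _
          (fun k => String.mk (List.map pvSym (pvBL u (2 ^ b - 1 + k))))
          (by
            intro k hk
            have hlt := hmemlt k hk
            simp only [Function.comp_apply, Int.toNat_natCast, Int.toNat_sub]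
            rw [decide_eq_decide, pvPad_eq_pvBL hu1 hlt]
            exact Int.natCast_inj)
          (by
            intro k hk
            have hlt := hmemlt k hk
            simp only [Function.comp_apply, Int.toNat_natCast, Int.toNat_sub]
            rw [pvPad_eq_pvBL hu1 hlt, pvBL_length]
            simp only [Nat.sub_self, List.replicate_zero, List.nil_append]
            rw [List.map_map]
            rfl)]
    rw [← pvR_eq_pvG u b,
        pvRangeShift b u hbu _ (by
          intro n hn
          apply decide_eq_false
          intro hcnt
          have hltn : n < 2 ^ u := by omega
          rw [pvBL_count hltn] at hcnt
          have := pvBin_count_ge hcnt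
          omega)]
    simp [List.map_map]
  · -- u < b : the scanned range is empty and pvG is empty
    have hub : u < b := Nat.lt_of_not_le hbu
    have h2 : (2:Int) ^ u ≤ 2 ^ b - 1 := by
      have : (2:Nat) ^ u < 2 ^ b := Nat.pow_lt_pow_right (by norm_num) hub
      have h' : ((2:Nat) ^ u : Int) < ((2:Nat) ^ b : Int) := by exact_mod_cast this
      push_cast at h'
      linarith
    rw [PySem.List.pyRange_one_eq_nil h2, pvG_gt hub]
    simp

theorem possible_patterns_changed : Claim_changed_possible_patterns := by
  unfold Claim_changed_possible_patterns; decide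

theorem possible_patterns_tight : Claim_exact_possible_patterns := by
  intro broken unknown _ _ hD
  obtain ⟨hb, hu⟩ := hD
  subst hb; subst hu
  decide
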